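-- pv_equiv track=rewrite | github.com/maze-runnar/interview-preparation-kit | Dynamic Programming/DecibinaryNumber.py | decbinValue
-- ===== SOURCE A (Python) =====
-- def decbinValue(x):
--     ans = 0
--     p2 = 1
--     while x > 0:
--         ans += (x % 10) * p2
--         p2 *= 2
--         x //= 10
--     return ans
-- ===== SOURCE B (Python) =====
-- def decbinValue(x):
--     if x <= 0:
--         return 0
--     ans = 0
--     for c in str(x):
--         ans = ans * 2 + (ord(c) - 48)
--     return ans
-- ===== Notes on version B (the rewrite author's own statement) =====
-- stated objective: idiomatic
-- what changed: Replaces the LSB-first while loop with an explicit power-of-two accumulator (x%10, x//=10, p2*=2) by Horner's method over the decimal string str(x), reading digits most-significant-first with no power accumulator.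
import Mathlib
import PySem

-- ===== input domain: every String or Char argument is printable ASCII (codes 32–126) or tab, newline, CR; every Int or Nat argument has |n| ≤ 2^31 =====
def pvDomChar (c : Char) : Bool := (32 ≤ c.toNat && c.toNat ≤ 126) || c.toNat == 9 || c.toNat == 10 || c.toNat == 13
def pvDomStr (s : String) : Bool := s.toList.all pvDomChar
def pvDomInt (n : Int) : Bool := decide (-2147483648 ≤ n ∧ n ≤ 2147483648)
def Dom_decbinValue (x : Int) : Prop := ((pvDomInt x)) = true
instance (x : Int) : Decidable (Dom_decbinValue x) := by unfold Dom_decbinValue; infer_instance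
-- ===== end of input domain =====

-- B replaces A's LSB-first divide/modulo loop with Horner's method over str(x),
-- reading the decimal digits most-significant-first (objective: idiomatic). Same cost; not claimed faster.

-- ===== PORT A =====
-- the while loop of A: state (x, ans, p2), LSB-first accumulation
def decbinGo (x ans p2 : Int) : Int :=
  if h : x > 0 then
    decbinGo (PySem.Int.floordiv x 10) (ans + (PySem.Int.mod x 10) * p2) (p2 * 2)
  else ans
termination_by x.toNat
decreasing_by
  rw [PySem.Int.floordiv_eq_ediv_of_pos (by norm_num : (0:Int) < 10)]
  omega

def decbinValue (x : Int) : Int := decbinGo x 0 1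

-- ===== PORT B =====
-- Horner step: ans = ans * 2 + (ord(c) - 48)
def decbinStep (a : Int) (c : Char) : Int := a * 2 + ((c.toNat : Int) - 48)

def decbinValue_alt (x : Int) : Int :=
  if x ≤ 0 then 0
  else (PySem.Int.toStr x).toList.foldl decbinStep 0

-- ===== PRECONDITION & SPEC =====
def Spec_decbinValue (x : Int) (out : Int) : Prop := out = decbinValue_alt x
instance (x : Int) (out : Int) : Decidable (Spec_decbinValue x out) := by unfold Spec_decbinValue; infer_instance

-- ===== CLAIM (what is proved, stated in full; the proofs are below) =====
def Claim_equal_decbinValue : Prop := ∀ (x : Int), Dom_decbinValue x → Spec_decbinValue x (decbinValue x)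

-- ===== LEMMAS AND PROOFS =====

-- the decibinary value of a nonneg number, digitwise: dbv n = n%10 + 2 * dbv (n/10)
def dbv (n : Nat) : Int :=
  if n = 0 then 0 else (n % 10 : Nat) + 2 * dbv (n / 10)
decreasing_by exact Nat.div_lt_self (Nat.pos_of_ne_zero (by assumption)) (by norm_num)

theorem decbinGo_eq (n : Nat) : ∀ ans p2 : Int, decbinGo (n : Int) ans p2 = ans + p2 * dbv n := by
  induction n using Nat.strong_induction_on with
  | _ n ih =>
    intro ans p2
    by_cases h : n = 0
    · subst h; simp [decbinGo, dbv]
    · have hpos : (0:Int) < (n:Int) := by exact_mod_cast Nat.pos_of_ne_zero h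
      rw [decbinGo, dif_pos hpos,
          show ((10:Int)) = ((10:Nat):Int) from rfl,
          PySem.Int.floordiv_natCast, PySem.Int.mod_natCast,
          ih (n / 10) (Nat.div_lt_self (Nat.pos_of_ne_zero h) (by norm_num))]
      conv_rhs => rw [dbv, if_neg h]
      ring

theorem decbinStep_digitChar (a : Int) (m : Nat) (hm : m < 10) :
    decbinStep a (Nat.digitChar m) = a * 2 + m := by
  unfold decbinStep
  interval_cases m <;> simp [Nat.digitChar]

-- Horner's recurrence read most-significant-digit-first, starting from accumulator a
def hornerAcc (a : Int) (n : Nat) : Int :=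
  if n < 10 then a * 2 + n else (hornerAcc a (n / 10)) * 2 + (n % 10 : Nat)
decreasing_by exact Nat.div_lt_self (by omega) (by norm_num)

theorem foldl_toDigitsCore (fuel : Nat) : ∀ (n : Nat) (ds : List Char) (a : Int), n < fuel →
    List.foldl decbinStep a (Nat.toDigitsCore 10 fuel n ds) =
      List.foldl decbinStep (hornerAcc a n) ds := by
  induction fuel with
  | zero => intro n ds a h; omega
  | succ fuel ih =>
    intro n ds a h
    rw [Nat.toDigitsCore]
    by_cases h0 : n / 10 = 0
    · have hn : n < 10 := by omega
      simp only [h0, if_true, List.foldl]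
      rw [decbinStep_digitChar a (n % 10) (Nat.mod_lt _ (by norm_num))]
      rw [hornerAcc, if_pos hn, Nat.mod_eq_of_lt hn]
    · simp only [h0, if_false]
      have hfuel : n / 10 < fuel := by
        have := Nat.div_lt_self (Nat.pos_of_ne_zero (by omega : n ≠ 0)) (by norm_num : 1 < 10)
        omega
      rw [ih (n / 10) _ a hfuel]
      simp only [List.foldl]
      rw [decbinStep_digitChar _ (n % 10) (Nat.mod_lt _ (by norm_num))]
      conv_rhs => rw [hornerAcc, if_neg (by omega : ¬ n < 10)]

theorem hornerAcc_zero_eq_dbv (n : Nat) : hornerAcc 0 n = dbv n := by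
  induction n using Nat.strong_induction_on with
  | _ n ih =>
    by_cases hn : n < 10
    · rw [hornerAcc, if_pos hn, dbv]
      by_cases hz : n = 0
      · subst hz; simp
      · rw [if_neg hz, Nat.mod_eq_of_lt hn, show n / 10 = 0 by omega, dbv]
        simp
    · rw [hornerAcc, if_neg hn,
          ih (n / 10) (Nat.div_lt_self (by omega) (by norm_num))]
      conv_rhs => rw [dbv, if_neg (by omega : ¬ n = 0)]
      ring

theorem horner_eq_dbv (n : Nat) :
    List.foldl decbinStep 0 (Nat.toDigits 10 n) = dbv n := by
  rw [Nat.toDigits, foldl_toDigitsCore (n + 1) n [] 0 (Nat.lt_succ_self n)]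
  simp [List.foldl, hornerAcc_zero_eq_dbv]

-- ===== VERDICT (by name: the statement is the Claim_ definition above) =====
theorem decbinValue_spec : Claim_equal_decbinValue := by
  intro x _
  unfold Spec_decbinValue decbinValue decbinValue_alt
  by_cases hx : x ≤ 0
  · rw [decbinGo, dif_neg (by omega : ¬ x > 0)]
    rw [if_pos hx]
  · obtain ⟨n, rfl⟩ : ∃ n : Nat, x = (n : Int) := ⟨x.toNat, by omega⟩
    rw [if_neg hx, PySem.Int.toList_toStr, PySem.Int.toChars,
        if_neg (by omega : ¬ (n:Int) < 0), Int.toNat_natCast, horner_eq_dbv,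
        decbinGo_eq]
    ring
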